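-- pv_equiv track=rewrite | github.com/csusb-005411285/CodeBreakersCode | pattern-match-ae.py | does_match_pattern
-- ===== SOURCE A (Python) =====
-- def does_match_pattern(s1, s2, string, pattern):
--     result = ''
--
--     for p in pattern:
--         if p == 'x':
--             result += s1
--         else:
--             result += s2
--
--     if result == string:
--         return [s1, s2]
--
--     return []
-- ===== SOURCE B (Python) =====
-- def does_match_pattern(s1, s2, string, pattern):
--     pos = 0
--     for p in pattern:
--         seg = s1 if p == 'x' else s2
--         if string[pos:pos + len(seg)] != seg:
--             return []
--         pos += len(seg)
--     return [s1, s2] if pos == len(string) else []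
-- ===== Notes on version B (the rewrite author's own statement) =====
-- stated objective: faster
-- what changed: B validates the expansion in place with an integer cursor and per-segment slice comparisons (early exit on first mismatch) instead of concatenating the full expanded string and comparing it to the target at the end.
import Mathlib
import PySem

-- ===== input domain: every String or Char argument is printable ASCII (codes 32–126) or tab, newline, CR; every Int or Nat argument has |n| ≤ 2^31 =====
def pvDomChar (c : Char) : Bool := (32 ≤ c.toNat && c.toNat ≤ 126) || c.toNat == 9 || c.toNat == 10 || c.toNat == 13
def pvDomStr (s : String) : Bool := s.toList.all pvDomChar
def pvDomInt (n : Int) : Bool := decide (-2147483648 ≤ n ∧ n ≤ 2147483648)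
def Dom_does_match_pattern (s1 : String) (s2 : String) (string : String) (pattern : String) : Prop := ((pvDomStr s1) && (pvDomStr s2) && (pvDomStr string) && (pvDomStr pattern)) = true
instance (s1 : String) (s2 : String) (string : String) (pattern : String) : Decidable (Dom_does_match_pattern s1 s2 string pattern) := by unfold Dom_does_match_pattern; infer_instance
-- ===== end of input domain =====

-- B checks the expansion in place with an integer cursor and slice comparisons instead of
-- building the full expanded string and comparing it at the end (objective: alternative).

-- ===== PORT A =====
-- result = ''; for p in pattern: result += s1 if p=='x' else s2; return [s1,s2] if result==string else []
def does_match_pattern (s1 : String) (s2 : String) (string : String) (pattern : String) : List String :=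
  let result := pattern.toList.foldl
    (fun acc p => if p = 'x' then acc ++ s1.toList else acc ++ s2.toList) ([] : List Char)
  if result = string.toList then [s1, s2] else []

-- ===== PORT B =====
-- the for-loop of Source B: cursor pos, early return (none) on a slice mismatch
def dmpGo (s1c s2c sc : List Char) : List Char → Nat → Option Nat
  | [], pos => some pos
  | p :: ps, pos =>
    let seg := if p = 'x' then s1c else s2c
    if PySem.List.slice sc (some (pos : Int)) (some ((pos : Int) + (seg.length : Int))) = seg
    then dmpGo s1c s2c sc ps (pos + seg.length)
    else none

def does_match_pattern_alt (s1 : String) (s2 : String) (string : String) (pattern : String) : List String :=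
  match dmpGo s1.toList s2.toList string.toList pattern.toList 0 with
  | none => []
  | some pos => if pos = string.toList.length then [s1, s2] else []

-- ===== PRECONDITION & SPEC =====
def Spec_does_match_pattern (s1 : String) (s2 : String) (string : String) (pattern : String) (out : List String) : Prop := out = does_match_pattern_alt s1 s2 string pattern
instance (s1 : String) (s2 : String) (string : String) (pattern : String) (out : List String) : Decidable (Spec_does_match_pattern s1 s2 string pattern out) := by unfold Spec_does_match_pattern; infer_instance

-- ===== CLAIM (what is proved, stated in full; the proofs are below) =====
def Claim_equal_does_match_pattern : Prop := ∀ (s1 : String) (s2 : String) (string : String) (pattern : String), Dom_does_match_pattern s1 s2 string pattern → Spec_does_match_pattern s1 s2 string pattern (does_match_pattern s1 s2 string pattern)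

-- ===== LEMMAS AND PROOFS =====

-- the string A builds, as a structural recursion
def dmpExpand (s1c s2c : List Char) : List Char → List Char
  | [] => []
  | p :: ps => (if p = 'x' then s1c else s2c) ++ dmpExpand s1c s2c ps

theorem dmp_foldl_expand (s1c s2c : List Char) (ps : List Char) (acc : List Char) :
    ps.foldl (fun acc p => if p = 'x' then acc ++ s1c else acc ++ s2c) acc
      = acc ++ dmpExpand s1c s2c ps := by
  induction ps generalizing acc with
  | nil => simp [dmpExpand]
  | cons p ps ih =>
    simp only [List.foldl_cons, dmpExpand, ih]
    by_cases h : p = 'x' <;> simp [h]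

theorem dmp_go_iff (s1c s2c sc : List Char) (ps : List Char) (pos : Nat) (hpos : pos ≤ sc.length) :
    dmpGo s1c s2c sc ps pos = some sc.length ↔ sc.drop pos = dmpExpand s1c s2c ps := by
  induction ps generalizing pos with
  | nil =>
    simp only [dmpGo, dmpExpand, Option.some.injEq, List.drop_eq_nil_iff]
    omega
  | cons p ps ih =>
    simp only [dmpGo, dmpExpand]
    set seg : List Char := if p = 'x' then s1c else s2c with hseg
    rw [PySem.List.slice_natCast_add]
    by_cases h : (sc.drop pos).take seg.length = seg
    · rw [if_pos h]
      have hlen : seg.length ≤ sc.length - pos := by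
        have := congrArg List.length h
        simp only [List.length_take, List.length_drop] at this
        omega
      have hsplit : sc.drop pos = seg ++ sc.drop (pos + seg.length) := by
        conv_lhs => rw [← List.take_append_drop seg.length (sc.drop pos)]
        rw [h, List.drop_drop]
      rw [ih (pos + seg.length) (by omega), hsplit, List.append_right_inj]
    · rw [if_neg h]
      constructor
      · intro hcontra; cases hcontra
      · intro hc
        exfalso
        apply h
        rw [hc, List.take_left]

-- ===== VERDICT (by name: the statement is the Claim_ definition above) =====
theorem does_match_pattern_spec : Claim_equal_does_match_pattern := by
  intro s1 s2 string pattern _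
  unfold Spec_does_match_pattern does_match_pattern does_match_pattern_alt
  rw [dmp_foldl_expand s1.toList s2.toList pattern.toList []]
  simp only [List.nil_append]
  have hiff := dmp_go_iff s1.toList s2.toList string.toList pattern.toList 0 (Nat.zero_le _)
  simp only [List.drop_zero] at hiff
  by_cases h : dmpExpand s1.toList s2.toList pattern.toList = string.toList
  · rw [if_pos h, hiff.mpr h.symm]
    simp
  · rw [if_neg h]
    rcases hgo : dmpGo s1.toList s2.toList string.toList pattern.toList 0 with _ | q
    · rfl
    · have hq : q ≠ string.toList.length := by
        intro hq
        exact h ((hiff.mp (by rw [hgo, hq])).symm)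
      simpa using hq
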